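-- pv_equiv track=rewrite | github.com/PedroMarques27Vault/TeoriaAlgoritmicaDeInformacao | Project1/bin/fcm.py | get_expressions_from_data
-- ===== SOURCE A (Python) =====
-- def get_expressions_from_data(data, table, alphabet, k):
--
--     # pass through all the characters and insert every 3 in the dict
--     # along with the next character and the times they appear
--     for i in range(len(data) - k):
--         context = data[i:i + k]
--         next_char = data[i + k]
--
--         if type(table) == dict:
--             if context not in table:
--                 table[context] = {next_char: 1}
--             else:
--                 if next_char not in table[context]:
--                     table[context][next_char] = 1
--                 else:
--                     table[context][next_char] += 1
--         else:
--             table[get_index(context, alphabet, k)][alphabet.index(next_char)] += 1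
--     return table
--
-- def get_index(context, alphabet, k):
--     a_size = len(alphabet)
--     index = 0
--     count = k - 1
--
--     for i in context:
--         index += (a_size ** count) * alphabet.index(i)
--         count -= 1
--
--     return index
-- ===== SOURCE B (Python) =====
-- def get_expressions_from_data(data, table, alphabet, k):
--     # single left-to-right pass with a rolling window; setdefault/get replace
--     # the slice-per-index loop and the nested membership branches
--     window = data[:k]
--     for nxt in data[k:]:
--         inner = table.setdefault(window, {})
--         inner[nxt] = inner.get(nxt, 0) + 1
--         window = (window + nxt)[1:]
--     return table
-- ===== Notes on version B (the rewrite author's own statement) =====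
-- stated objective: simpler
-- what changed: Replaces A's index loop (slice data[i:i+k] per step plus nested 'not in' membership branches) by a single left-to-right pass that maintains a rolling k-char window and updates the nested dict with setdefault/get.
-- outside the precondition, e.g. on get_expressions_from_data('ab', {}, '', -1): A returns {'a': {'b': 1}, '': {'a': 1, 'b': 1}}, B returns {'a': {'b': 1}}
import Mathlib
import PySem

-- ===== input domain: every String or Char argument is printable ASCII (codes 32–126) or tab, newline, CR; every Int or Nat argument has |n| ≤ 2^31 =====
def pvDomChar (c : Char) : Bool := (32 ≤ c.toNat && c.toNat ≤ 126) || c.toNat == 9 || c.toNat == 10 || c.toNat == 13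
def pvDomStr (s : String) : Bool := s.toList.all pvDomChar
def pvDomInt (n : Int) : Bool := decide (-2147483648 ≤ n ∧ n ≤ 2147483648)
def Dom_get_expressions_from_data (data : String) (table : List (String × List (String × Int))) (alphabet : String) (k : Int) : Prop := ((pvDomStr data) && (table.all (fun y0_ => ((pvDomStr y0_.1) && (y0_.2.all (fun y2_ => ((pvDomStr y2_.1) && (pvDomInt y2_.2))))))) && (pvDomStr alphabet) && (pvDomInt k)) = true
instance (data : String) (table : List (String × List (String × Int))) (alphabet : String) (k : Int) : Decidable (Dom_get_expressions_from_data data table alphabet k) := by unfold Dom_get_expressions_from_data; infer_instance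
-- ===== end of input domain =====

-- B is a single rolling-window pass with setdefault/get instead of A's index loop with a
-- slice per index and nested membership branches; equal return value on Pre_ (0 ≤ k).
-- Both Pythons mutate (and return) the dict argument `table`; the equivalence proved
-- here is about the RETURN value only.

-- ===== PORT A =====
-- the dict-branch body of A's loop (the Lean argument type is the dict encoding, so
-- `type(table) == dict` holds and the array branch is unreachable)
def pvBumpA (table : PySem.Dict String (PySem.Dict String Int)) (context : String)
    (next_char : String) : PySem.Dict String (PySem.Dict String Int) :=
  if table.contains context = false then
    table.insert context (PySem.Dict.empty.insert next_char 1)       -- table[context] = {next_char: 1}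
  else
    let inner := table.getD context PySem.Dict.empty
    if inner.contains next_char = false then
      table.insert context (inner.insert next_char 1)                -- table[context][next_char] = 1
    else
      table.insert context (inner.insert next_char (inner.getD next_char 0 + 1))  -- += 1

def pvStepA (data : String) (k : Int) (tb : PySem.Dict String (PySem.Dict String Int))
    (i : Int) : PySem.Dict String (PySem.Dict String Int) :=
  let context := PySem.Str.slice data (some i) (some (i + k))        -- data[i:i + k]
  match PySem.Str.pyGet? data (i + k) with                           -- data[i + k]; none = IndexError, outside Pre_
  | some nc => pvBumpA tb context (String.ofList [nc])
  | none => tb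

def get_expressions_from_data (data : String) (table : List (String × List (String × Int))) (alphabet : String) (k : Int) : List (String × List (String × Int)) :=
  let d0 : PySem.Dict String (PySem.Dict String Int) :=
    PySem.Dict.ofList (table.map (fun p => (p.1, PySem.Dict.ofList p.2)))
  let d := (PySem.List.pyRange 0 (PySem.Str.len data - k) 1).foldl (pvStepA data k) d0
  d.items.map (fun p => (p.1, p.2.items))

-- ===== PORT B =====
def pvStepB (st : PySem.Dict String (PySem.Dict String Int) × String) (c : Char) :
    PySem.Dict String (PySem.Dict String Int) × String :=
  let key := String.ofList [c]
  let inner := st.1.getD st.2 PySem.Dict.empty                       -- inner = table.setdefault(window, {})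
  (st.1.insert st.2 (inner.insert key (inner.getD key 0 + 1)),       -- inner[nxt] = inner.get(nxt, 0) + 1
   PySem.Str.slice (st.2 ++ key) (some 1) none)                      -- window = (window + nxt)[1:]

def get_expressions_from_data_alt (data : String) (table : List (String × List (String × Int))) (alphabet : String) (k : Int) : List (String × List (String × Int)) :=
  let d0 : PySem.Dict String (PySem.Dict String Int) :=
    PySem.Dict.ofList (table.map (fun p => (p.1, PySem.Dict.ofList p.2)))
  let res := (PySem.Str.slice data (some k) none).toList.foldl pvStepB
      (d0, PySem.Str.slice data none (some k))
  res.1.items.map (fun p => (p.1, p.2.items))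

-- ===== PRECONDITION & SPEC =====
-- Pre_ excludes k < 0, on which A's data[i+k] negative-index wraparound reads contexts
-- from the wrong end of the string (or raises IndexError, for k < -len(data)): outside
-- the function's natural domain (k is a context length); B does the natural thing there.
def Pre_get_expressions_from_data (data : String) (table : List (String × List (String × Int))) (alphabet : String) (k : Int) : Prop := 0 ≤ k
instance (data : String) (table : List (String × List (String × Int))) (alphabet : String) (k : Int) : Decidable (Pre_get_expressions_from_data data table alphabet k) := by unfold Pre_get_expressions_from_data; infer_instance
def pvWitness_get_expressions_from_data : String × (List (String × List (String × Int))) × String × Int := ("abab", [("ab", [("a", 1)])], "ab", 2)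

def Spec_get_expressions_from_data (data : String) (table : List (String × List (String × Int))) (alphabet : String) (k : Int) (out : List (String × List (String × Int))) : Prop := out = get_expressions_from_data_alt data table alphabet k
instance (data : String) (table : List (String × List (String × Int))) (alphabet : String) (k : Int) (out : List (String × List (String × Int))) : Decidable (Spec_get_expressions_from_data data table alphabet k out) := by unfold Spec_get_expressions_from_data; infer_instance

-- ===== CLAIM (what is proved, stated in full; the proofs are below) =====
def Claim_equal_get_expressions_from_data : Prop := ∀ (data : String) (table : List (String × List (String × Int))) (alphabet : String) (k : Int), Dom_get_expressions_from_data data table alphabet k → Pre_get_expressions_from_data data table alphabet k → Spec_get_expressions_from_data data table alphabet k (get_expressions_from_data data table alphabet k)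

-- ===== LEMMAS AND PROOFS =====

-- A's four-way branching update is B's single setdefault/get update
theorem pvBumpA_eq (tb : PySem.Dict String (PySem.Dict String Int)) (w key : String) :
    pvBumpA tb w key =
      tb.insert w ((tb.getD w PySem.Dict.empty).insert key
        ((tb.getD w PySem.Dict.empty).getD key 0 + 1)) := by
  unfold pvBumpA
  by_cases h : tb.contains w
  · by_cases h2 : (tb.getD w PySem.Dict.empty).contains key
    · simp [h, h2]
    · simp [h, h2, PySem.Dict.getD_of_not_contains _ _ (by simpa using h2)]
  · have hg : tb.getD w PySem.Dict.empty = PySem.Dict.empty :=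
      PySem.Dict.getD_of_not_contains _ _ (by simpa using h)
    simp [h, hg, pysem]

-- the rolling window after consuming c at position j+k' is the next k'-slice
theorem pv_window_step (L : List Char) (k' j : Nat) (c : Char)
    (h : j + k' < L.length) (hc : L[j + k']? = some c) :
    ((L.drop j).take k' ++ [c]).drop 1 = (L.drop (j + 1)).take k' := by
  rcases k' with _ | k''
  · simp
  · have hj : j < L.length := by omega
    rw [List.drop_eq_getElem_cons hj]
    have hcc : c = L[j + (k'' + 1)] := by
      have := List.getElem?_eq_getElem h
      rw [hc] at this; exact Option.some.inj this
    rw [List.take_succ_cons]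
    have : (L.drop (j + 1)).take (k'' + 1)
        = (L.drop (j + 1)).take k'' ++ [L[j + (k'' + 1)]] := by
      rw [List.take_add_one, List.getElem?_drop]
      have h1 : j + 1 + k'' < L.length := by omega
      rw [List.getElem?_eq_getElem h1]
      simp [show j + 1 + k'' = j + (k'' + 1) by omega]
    rw [this, hcc]
    simp

-- main loop correspondence: A's remaining index loop from j equals B's fold over the
-- remaining characters, with the window invariant window = data[j : j+k']
theorem pv_main (data : String) (k' : Nat) :
    ∀ (rest : List Char) (j : Nat) (tb : PySem.Dict String (PySem.Dict String Int)),
      data.toList.drop (j + k') = rest →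
      (PySem.List.pyRange (j : Int) (PySem.Str.len data - (k' : Int)) 1).foldl
          (pvStepA data (k' : Int)) tb
        = (rest.foldl pvStepB (tb, String.ofList ((data.toList.drop j).take k'))).1 := by
  intro rest
  induction rest with
  | nil =>
    intro j tb h
    have hn : data.toList.length ≤ j + k' := by
      simpa using (List.drop_eq_nil_iff).mp h
    rw [PySem.List.pyRange_one_eq_nil
      (by rw [show PySem.Str.len data = (data.toList.length : Int) from by simp [pysem]]; omega)]
    simp
  | cons c rs ih =>
    intro j tb h
    have hlt : j + k' < data.toList.length := by
      by_contra hge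
      rw [not_lt] at hge
      rw [List.drop_eq_nil_iff.mpr (by omega)] at h
      simp at h
    have hc : data.toList[j + k']? = some c := by
      rw [← List.head?_drop, h]; rfl
    rw [PySem.List.pyRange_one_cons (by rw [show PySem.Str.len data = (data.toList.length : Int) from by simp [pysem]]; omega)]
    rw [List.foldl_cons, List.foldl_cons]
    have hstep1 : pvStepA data (k' : Int) tb (j : Int)
        = (pvStepB (tb, String.ofList ((data.toList.drop j).take k')) c).1 := by
      have hg : PySem.Str.pyGet? data ((j : Int) + (k' : Int)) = some c := by
        rw [show (j : Int) + (k' : Int) = ((j + k' : Nat) : Int) by push_cast; ring,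
          PySem.Str.pyGet?_natCast]
        exact_mod_cast hc
      have hctx : PySem.Str.slice data (some (j : Int)) (some ((j : Int) + (k' : Int)))
          = String.ofList ((data.toList.drop j).take k') := by
        apply String.toList_inj.mp
        simp [pysem]
      have hg' : PySem.List.pyGet? data.toList ((j : Int) + (k' : Int)) = some c := by
        simpa [pysem] using hg
      simp [pvStepA, pvStepB, hg', hctx, pvBumpA_eq]
    have hstep2 : (pvStepB (tb, String.ofList ((data.toList.drop j).take k')) c).2
        = String.ofList ((data.toList.drop (j + 1)).take k') := by
      unfold pvStepB
      apply String.toList_inj.mp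
      have hsl : (PySem.Str.slice (String.ofList ((data.toList.drop j).take k') ++ String.ofList [c]) (some 1) none).toList
          = ((data.toList.drop j).take k' ++ [c]).drop 1 := by
        simp [pysem]
      rw [hsl, pv_window_step data.toList k' j c hlt hc]
      simp
    have h' : data.toList.drop (j + 1 + k') = rs := by
      rw [show j + 1 + k' = (j + k') + 1 by omega, List.drop_add_one_eq_tail_drop, h]
      rfl
    have hpair : pvStepB (tb, String.ofList ((data.toList.drop j).take k')) c
        = ((pvStepB (tb, String.ofList ((data.toList.drop j).take k')) c).1,
           String.ofList ((data.toList.drop (j + 1)).take k')) := by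
      rw [← hstep2]
    rw [hstep1, hpair]
    have hrec := ih (j + 1)
      (pvStepB (tb, String.ofList ((data.toList.drop j).take k')) c).1 h'
    exact_mod_cast hrec

-- ===== VERDICT (by name: the statement is the Claim_ definition above) =====
theorem get_expressions_from_data_spec : Claim_equal_get_expressions_from_data := by
  intro data table alphabet k _ hpre
  unfold Spec_get_expressions_from_data
  unfold get_expressions_from_data get_expressions_from_data_alt
  obtain ⟨k', rfl⟩ : ∃ k' : Nat, k = (k' : Int) := ⟨k.toNat, (Int.toNat_of_nonneg hpre).symm⟩
  have hrest : (PySem.Str.slice data (some (k' : Int)) none).toList = data.toList.drop k' := by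
    simp [pysem]
  have hinit : PySem.Str.slice data none (some (k' : Int))
      = String.ofList ((data.toList.drop 0).take k') := by
    apply String.toList_inj.mp; simp [pysem]
  have := pv_main data k' (data.toList.drop k') 0 (PySem.Dict.ofList (table.map (fun p => (p.1, PySem.Dict.ofList p.2)))) (by simp)
  rw [show ((0 : Nat) : Int) = (0 : Int) by rfl] at this
  simp only [hrest, ← hinit] at this ⊢
  rw [this]
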